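-- pv_equiv track=rewrite | github.com/EricTheNormalStudent/hw4-jz4440 | part-2-code/compute_stats.py | strip_schema_tokens
-- ===== SOURCE A (Python) =====
-- from typing import Dict, List, Sequence, Tuple
--
-- def strip_schema_tokens(sentence: str) -> str:
--     """Remove bracketed schema hints like '[table.column]'."""
--     output_chars: List[str] = []
--     skip = False
--     for char in sentence:
--         if char == "[":
--             skip = True
--             continue
--         if char == "]":
--             skip = False
--             continue
--         if not skip:
--             output_chars.append(char)
--     return "".join(output_chars)
-- ===== SOURCE B (Python) =====
-- def strip_schema_tokens(sentence: str) -> str: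
--     """Remove bracketed schema hints like '[table.column]'."""
--     parts = sentence.split("[")
--     out = parts[0].split("]")
--     for part in parts[1:]:
--         out.extend(part.split("]")[1:])
--     return "".join(out)
-- ===== Notes on version B (the rewrite author's own statement) =====
-- stated objective: idiomatic
-- what changed: Replaced the per-character loop with a mutable skip flag by a split-based decomposition (split on open bracket; head split on close bracket to remove stray closers; each later part keeps only the segments after its first close bracket, dropped entirely if none; join), moving the work into C-level str.split.
import Mathlib
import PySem

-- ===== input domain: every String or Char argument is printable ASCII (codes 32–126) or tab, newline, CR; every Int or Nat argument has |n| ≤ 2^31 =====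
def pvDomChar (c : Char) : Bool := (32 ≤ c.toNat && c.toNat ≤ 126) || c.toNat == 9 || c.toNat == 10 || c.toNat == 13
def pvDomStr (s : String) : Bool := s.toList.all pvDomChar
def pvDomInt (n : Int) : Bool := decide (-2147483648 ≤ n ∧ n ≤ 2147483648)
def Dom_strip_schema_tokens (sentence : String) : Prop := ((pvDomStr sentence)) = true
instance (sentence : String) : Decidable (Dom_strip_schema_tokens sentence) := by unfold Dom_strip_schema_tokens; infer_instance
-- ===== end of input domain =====

-- B replaces A's per-character skip-flag loop by split-on-bracket decomposition (objective: idiomatic).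

-- ===== PORT A =====
-- literal transliteration of A: a fold over the characters carrying (skip, output_chars)
def strip_schema_tokens (sentence : String) : String :=
  let st := sentence.toList.foldl
    (fun (st : Bool × List Char) c =>
      if c = '[' then (true, st.2)
      else if c = ']' then (false, st.2)
      else if !st.1 then (st.1, st.2 ++ [c])
      else st)
    (false, [])
  String.ofList st.2

-- ===== PORT B =====
-- transliteration of Source B: split on '[', the head split on ']' (stray closers removed),
-- each later part keeps only what follows its first ']' (dropped entirely if none), then join
def strip_schema_tokens_alt (sentence : String) : String :=
  let parts := sentence.toList.splitOn '['
  let out := parts.headI.splitOn ']' ++ parts.tail.flatMap (fun part => (part.splitOn ']').tail)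
  String.ofList out.flatten

-- ===== PRECONDITION & SPEC =====
def Spec_strip_schema_tokens (sentence : String) (out : String) : Prop := out = strip_schema_tokens_alt sentence
instance (sentence : String) (out : String) : Decidable (Spec_strip_schema_tokens sentence out) := by unfold Spec_strip_schema_tokens; infer_instance

-- ===== CLAIM (what is proved, stated in full; the proofs are below) =====
def Claim_equal_strip_schema_tokens : Prop := ∀ (sentence : String), Dom_strip_schema_tokens sentence → Spec_strip_schema_tokens sentence (strip_schema_tokens sentence)

-- ===== LEMMAS AND PROOFS =====

-- recursive characterization of A's fold
def stripRec (skip : Bool) : List Char → List Char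
  | [] => []
  | c :: t =>
    if c = '[' then stripRec true t
    else if c = ']' then stripRec false t
    else if !skip then c :: stripRec skip t
    else stripRec skip t

theorem foldl_eq_stripRec (l : List Char) (skip : Bool) (acc : List Char) :
    (l.foldl (fun (st : Bool × List Char) c =>
      if c = '[' then (true, st.2)
      else if c = ']' then (false, st.2)
      else if !st.1 then (st.1, st.2 ++ [c])
      else st) (skip, acc)).2 = acc ++ stripRec skip l := by
  induction l generalizing skip acc with
  | nil => simp [stripRec]
  | cons c t ih =>
    simp at ih
    simp only [List.foldl_cons, stripRec]
    by_cases h1 : c = '['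
    · simp [h1, ih]
    · by_cases h2 : c = ']'
      · simp [h2, ih]
      · cases skip <;> simp [h1, h2, ih]

-- the "outside a bracket" reading of B
def bOut (l : List Char) : List Char :=
  let parts := l.splitOn '['
  (parts.headI.splitOn ']' ++ parts.tail.flatMap (fun part => (part.splitOn ']').tail)).flatten

-- the "inside a bracket" reading of B: every part of the '['-split is inside
def bIn (l : List Char) : List Char :=
  ((l.splitOn '[').flatMap (fun part => (part.splitOn ']').tail)).flatten

theorem splitOn_char_cons_self (a : Char) (t : List Char) :
    (a :: t).splitOn a = [] :: t.splitOn a := by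
  simp [List.splitOn, List.splitOnP_cons]

theorem splitOn_char_cons_ne (a c : Char) (t : List Char) (h : c ≠ a) :
    (c :: t).splitOn a = (c :: (t.splitOn a).headI) :: (t.splitOn a).tail := by
  simp only [List.splitOn, List.splitOnP_cons, beq_iff_eq, h, if_false]
  cases hs : t.splitOnP (· == a) with
  | nil => exact absurd hs (List.splitOnP_ne_nil _ t)
  | cons q qs => simp [List.modifyHead]

theorem splitOn_char_ne_nil (a : Char) (l : List Char) : l.splitOn a ≠ [] :=
  List.splitOnP_ne_nil _ l

-- joint characterization: stripRec false = bOut, stripRec true = bIn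
theorem stripRec_characterization (l : List Char) :
    stripRec false l = bOut l ∧ stripRec true l = bIn l := by
  induction l with
  | nil =>
    constructor <;> simp [stripRec, bOut, bIn]
  | cons c t ih =>
    obtain ⟨ihF, ihT⟩ := ih
    by_cases h1 : c = '['
    · subst h1
      constructor <;>
        simp [stripRec, bOut, bIn, splitOn_char_cons_self, ihT]
    · by_cases h2 : c = ']'
      · subst h2
        have hne : (']' : Char) ≠ '[' := by decide
        cases hs : t.splitOn '[' with
        | nil => exact absurd hs (splitOn_char_ne_nil _ t)
        | cons q qs =>
          constructor <;>
            simp [stripRec, bOut, bIn, splitOn_char_cons_ne '[' ']' t hne, hs,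
              splitOn_char_cons_self, ihF]
      · cases hs : t.splitOn '[' with
        | nil => exact absurd hs (splitOn_char_ne_nil _ t)
        | cons q qs =>
          cases hq : q.splitOn ']' with
          | nil => exact absurd hq (splitOn_char_ne_nil _ q)
          | cons s ss =>
            constructor <;>
              simp [stripRec, h1, h2, bOut, bIn, splitOn_char_cons_ne '[' c t h1, hs,
                splitOn_char_cons_ne ']' c _ h2, hq, ihF, ihT]

-- ===== VERDICT (by name: the statement is the Claim_ definition above) =====
theorem strip_schema_tokens_spec : Claim_equal_strip_schema_tokens := by
  intro sentence _
  unfold Spec_strip_schema_tokens strip_schema_tokens strip_schema_tokens_alt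
  simp only [foldl_eq_stripRec sentence.toList false [], List.nil_append]
  exact congrArg String.ofList (stripRec_characterization sentence.toList).1
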